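-- pv_equiv track=rewrite | github.com/zb0r0/python-data-analysis | main.py | zadanie1_1
-- ===== SOURCE A (Python) =====
-- def zadanie1_1(dane):
--     sezon = [0, 0, 0, 0]
--     for linijka in dane[1:]:
--         # 1.1
--         if linijka[9] == "Spring":
--             sezon[0] += int(linijka[5])
--         if linijka[9] == "Summer":
--             sezon[1] += int(linijka[5])
--         if linijka[9] == "Fall":
--             sezon[2] += int(linijka[5])
--         if linijka[9] == "Winter":
--             sezon[3] += int(linijka[5])
--     return sezon
-- ===== SOURCE B (Python) =====
-- def zadanie1_1(dane):
--     return [sum(int(l[5]) for l in dane[1:] if l[9] == s)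
--             for s in ("Spring", "Summer", "Fall", "Winter")]
-- ===== Notes on version B (the rewrite author's own statement) =====
-- stated objective: alternative
-- what changed: Replaces the single accumulator loop with four mutually-exclusive branches by four independent filtered summations, one scan of the data per season, built as a comprehension over the fixed season list.
import Mathlib
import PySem

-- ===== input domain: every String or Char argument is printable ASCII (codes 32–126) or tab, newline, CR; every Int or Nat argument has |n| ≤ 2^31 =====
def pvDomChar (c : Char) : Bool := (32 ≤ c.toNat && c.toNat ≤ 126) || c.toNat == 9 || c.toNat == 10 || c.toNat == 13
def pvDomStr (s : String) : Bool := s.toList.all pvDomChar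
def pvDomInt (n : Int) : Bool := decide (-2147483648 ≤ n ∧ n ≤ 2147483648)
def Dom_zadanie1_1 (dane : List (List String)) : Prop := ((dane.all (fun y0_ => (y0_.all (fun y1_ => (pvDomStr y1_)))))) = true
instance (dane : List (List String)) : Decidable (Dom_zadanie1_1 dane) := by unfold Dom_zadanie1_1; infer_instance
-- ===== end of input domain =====

-- B replaces A's single loop over four accumulators by four independent filtered summations, one per season; same results, same cost class (objective: alternative).


-- shared atomic helpers (exact under Pre_): linijka[9] and int(linijka[5])
def seasonOf (l : List String) : String := PySem.List.pyGetD l 9 ""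
def rowVal (l : List String) : Int := (PySem.Int.ofStr? (PySem.List.pyGetD l 5 "")).getD 0

-- ===== PORT A =====
-- the loop body: four independent 'if' updates on the four accumulators
def stepA (s : Int × Int × Int × Int) (l : List String) : Int × Int × Int × Int :=
  let s := if seasonOf l == "Spring" then (s.1 + rowVal l, s.2.1, s.2.2.1, s.2.2.2) else s
  let s := if seasonOf l == "Summer" then (s.1, s.2.1 + rowVal l, s.2.2.1, s.2.2.2) else s
  let s := if seasonOf l == "Fall"   then (s.1, s.2.1, s.2.2.1 + rowVal l, s.2.2.2) else s
  if seasonOf l == "Winter" then (s.1, s.2.1, s.2.2.1, s.2.2.2 + rowVal l) else s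

-- dane[1:] on a list is exactly List.drop 1
def zadanie1_1 (dane : List (List String)) : List Int :=
  let s := (dane.drop 1).foldl stepA (0, 0, 0, 0)
  [s.1, s.2.1, s.2.2.1, s.2.2.2]

-- ===== PORT B =====
-- sum(int(l[5]) for l in rows if l[9] == s)
def seasonSum (rows : List (List String)) (s : String) : Int :=
  ((rows.filter (fun l => seasonOf l == s)).map rowVal).sum

def zadanie1_1_alt (dane : List (List String)) : List Int :=
  ["Spring", "Summer", "Fall", "Winter"].map (seasonSum (dane.drop 1))

-- ===== PRECONDITION & SPEC =====
-- Pre_: every data row is long enough for linijka[9] (hence linijka[5]), and on rows whose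
-- season field is one of the four seasons, int(linijka[5]) parses; elsewhere the Python raises
-- IndexError / ValueError.
def Pre_zadanie1_1 (dane : List (List String)) : Prop :=
  ∀ l ∈ dane.drop 1, PySem.Raise.InRange l.length 9 ∧
    (seasonOf l ∈ ["Spring", "Summer", "Fall", "Winter"] →
      (PySem.Int.ofStr? (PySem.List.pyGetD l 5 "")).isSome)
instance (dane : List (List String)) : Decidable (Pre_zadanie1_1 dane) := by unfold Pre_zadanie1_1; infer_instance

def pvWitness_zadanie1_1 : List (List String) :=
  [["h","h","h","h","h","h","h","h","h","h"],
   ["a","b","c","d","e","3","g","h","i","Spring"],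
   ["a","b","c","d","e","-7","g","h","i","Winter"]]

def Spec_zadanie1_1 (dane : List (List String)) (out : List Int) : Prop := out = zadanie1_1_alt dane
instance (dane : List (List String)) (out : List Int) : Decidable (Spec_zadanie1_1 dane out) := by unfold Spec_zadanie1_1; infer_instance

-- ===== CLAIM (what is proved, stated in full; the proofs are below) =====
def Claim_equal_zadanie1_1 : Prop := ∀ (dane : List (List String)), Dom_zadanie1_1 dane → Pre_zadanie1_1 dane → Spec_zadanie1_1 dane (zadanie1_1 dane)

-- ===== LEMMAS AND PROOFS =====
lemma seasonSum_cons (x : List String) (xs : List (List String)) (s : String) :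
    seasonSum (x :: xs) s =
      (if seasonOf x == s then rowVal x else 0) + seasonSum xs s := by
  simp only [seasonSum, List.filter_cons]
  split_ifs <;> simp

lemma loopA_eq (l : List (List String)) (a b c d : Int) :
    l.foldl stepA (a, b, c, d) =
      (a + seasonSum l "Spring", b + seasonSum l "Summer",
       c + seasonSum l "Fall", d + seasonSum l "Winter") := by
  induction l generalizing a b c d with
  | nil => simp [seasonSum]
  | cons x xs ih =>
    simp only [List.foldl_cons, stepA, seasonSum_cons]
    split_ifs <;> simp [ih] <;> omega

-- ===== VERDICT (by name: the statement is the Claim_ definition above) =====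

theorem zadanie1_1_spec : Claim_equal_zadanie1_1 := by
  intro dane _ _
  unfold Spec_zadanie1_1 zadanie1_1 zadanie1_1_alt
  rw [loopA_eq]
  simp
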